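-- pv_equiv track=rewrite | github.com/twosigma/frost | tests/test_riscv_torture.py | compare_signatures
-- ===== SOURCE A (Python) =====
-- _SKIP_GPR_COMPARISON = True
--
-- _GPR_WORDS = 32  # x0-x31
--
-- _TOTAL_WORDS = 96  # 32 GPR + 64 FP (32 doubles * 2 words)
--
-- def compare_signatures(actual: list[str], expected: list[str]) -> tuple[bool, str]:
--     """Compare actual vs expected signatures.
--
--     Compares FP register words exactly.  Integer register words are
--     skipped because AMO address computation contaminates random GPRs
--     with layout-dependent addresses.
--     """
--     if len(actual) != _TOTAL_WORDS:
--         return (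
--             False,
--             f"actual signature has {len(actual)} words, expected {_TOTAL_WORDS}",
--         )
--     if len(expected) != _TOTAL_WORDS:
--         return False, f"reference has {len(expected)} words, expected {_TOTAL_WORDS}"
--
--     # Compare FP words (index 32..95)
--     diff_lines = []
--     start = _GPR_WORDS if _SKIP_GPR_COMPARISON else 0
--     for i in range(start, _TOTAL_WORDS):
--         act = actual[i]
--         exp = expected[i]
--         if act != exp:
--             diff_lines.append(f"  word {i}: got {act}, expected {exp}")
--             if len(diff_lines) >= 10:
--                 diff_lines.append("  ... and more")
--                 break
--
--     if not diff_lines: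
--         return True, ""
--     return False, "\n".join(diff_lines)
-- ===== SOURCE B (Python) =====
-- _SKIP_GPR_COMPARISON = True
--
-- _GPR_WORDS = 32  # x0-x31
--
-- _TOTAL_WORDS = 96  # 32 GPR + 64 FP (32 doubles * 2 words)
--
--
-- def _diff_lines(act, exp, index, budget):
--     """Recursively format mismatches between two equal-length tails, counting
--     the remaining line budget down; emits the marker when the budget runs out."""
--     if not act:
--         return []
--     if act[0] == exp[0]:
--         return _diff_lines(act[1:], exp[1:], index + 1, budget)
--     line = f"  word {index}: got {act[0]}, expected {exp[0]}"
--     if budget == 1: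
--         return [line, "  ... and more"]
--     return [line] + _diff_lines(act[1:], exp[1:], index + 1, budget - 1)
--
--
-- def compare_signatures(actual: list[str], expected: list[str]) -> tuple[bool, str]:
--     """Slice-and-recurse re-implementation: decide success with one whole-tail
--     equality test, and format mismatches by structural recursion on the tails."""
--     if len(actual) != _TOTAL_WORDS:
--         return (
--             False,
--             f"actual signature has {len(actual)} words, expected {_TOTAL_WORDS}",
--         )
--     if len(expected) != _TOTAL_WORDS:
--         return False, f"reference has {len(expected)} words, expected {_TOTAL_WORDS}"
--
--     start = _GPR_WORDS if _SKIP_GPR_COMPARISON else 0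
--     tail_a, tail_e = actual[start:], expected[start:]
--     if tail_a == tail_e:
--         return True, ""
--     return False, "\n".join(_diff_lines(tail_a, tail_e, start, 10))
-- ===== Notes on version B (the rewrite author's own statement) =====
-- stated objective: alternative
-- what changed: Replaces A's index loop with accumulator-length check and break by slicing the two FP tails, deciding success with a single whole-tail equality test, and formatting mismatches via a structural recursion over the tail pairs that counts a 10-line budget down to the truncation marker.
import Mathlib
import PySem

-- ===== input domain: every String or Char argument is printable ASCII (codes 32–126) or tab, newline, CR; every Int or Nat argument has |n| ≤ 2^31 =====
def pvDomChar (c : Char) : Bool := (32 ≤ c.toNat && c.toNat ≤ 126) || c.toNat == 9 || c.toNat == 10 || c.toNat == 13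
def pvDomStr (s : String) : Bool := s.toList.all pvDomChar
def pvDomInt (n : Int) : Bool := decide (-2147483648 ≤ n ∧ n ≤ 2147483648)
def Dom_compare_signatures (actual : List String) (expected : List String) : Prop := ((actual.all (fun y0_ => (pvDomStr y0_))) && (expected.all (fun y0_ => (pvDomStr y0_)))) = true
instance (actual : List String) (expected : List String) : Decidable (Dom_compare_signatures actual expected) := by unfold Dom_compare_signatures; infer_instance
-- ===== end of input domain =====

-- B replaces A's index loop (accumulator-length check + break) by slicing the FP tails,
-- one whole-tail equality test for success, and a budget-countdown recursion over the
-- tail pairs for the mismatch report: alternative decomposition, same O(n) cost.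

-- ===== PORT A =====
-- f-string "  word {i}: got {actual[i]}, expected {expected[i]}" (i always in range here,
-- so pyGetD with a dummy default is exact for Python's actual[i]/expected[i])
def pvLine (actual expected : List String) (i : Int) : String :=
  "  word " ++ PySem.Int.toStr i ++ ": got " ++ PySem.List.pyGetD actual i "" ++
    ", expected " ++ PySem.List.pyGetD expected i ""

-- A's for-loop over range(start, 96) with diff_lines accumulator, counter check and break
def pvLoopA (actual expected : List String) : List Int → List String → List String
  | [], acc => acc
  | i :: rest, acc =>
    if PySem.List.pyGetD actual i "" ≠ PySem.List.pyGetD expected i "" then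
      let acc' := acc ++ [pvLine actual expected i]
      if 10 ≤ acc'.length then acc' ++ ["  ... and more"]   -- break
      else pvLoopA actual expected rest acc'
    else pvLoopA actual expected rest acc

def compare_signatures (actual : List String) (expected : List String) : Bool × String :=
  if actual.length ≠ 96 then
    (false, "actual signature has " ++ PySem.Int.toStr actual.length ++ " words, expected 96")
  else if expected.length ≠ 96 then
    (false, "reference has " ++ PySem.Int.toStr expected.length ++ " words, expected 96")
  else
    -- start = _GPR_WORDS (32) since _SKIP_GPR_COMPARISON is the constant True
    let diff_lines := pvLoopA actual expected (PySem.List.pyRange 32 96 1) []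
    if diff_lines.isEmpty then (true, "")
    else (false, PySem.Str.join "\n" diff_lines)

-- ===== PORT B =====
-- Source B's _diff_lines: structural recursion on the two tails with a countdown budget
-- (the one-tail-empty case is unreachable for the equal-length tails B passes in)
def pvDiffLines : List String → List String → Int → Nat → List String
  | [], _, _, _ => []
  | _ :: _, [], _, _ => []
  | a :: as, e :: es, index, budget =>
    if a = e then pvDiffLines as es (index + 1) budget
    else
      let line := "  word " ++ PySem.Int.toStr index ++ ": got " ++ a ++ ", expected " ++ e
      if budget = 1 then [line, "  ... and more"]
      else line :: pvDiffLines as es (index + 1) (budget - 1)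

def compare_signatures_alt (actual : List String) (expected : List String) : Bool × String :=
  if actual.length ≠ 96 then
    (false, "actual signature has " ++ PySem.Int.toStr actual.length ++ " words, expected 96")
  else if expected.length ≠ 96 then
    (false, "reference has " ++ PySem.Int.toStr expected.length ++ " words, expected 96")
  else
    let tail_a := PySem.List.slice actual (some 32) none
    let tail_e := PySem.List.slice expected (some 32) none
    if tail_a = tail_e then (true, "")
    else (false, PySem.Str.join "\n" (pvDiffLines tail_a tail_e 32 10))

-- ===== PRECONDITION & SPEC =====
def Spec_compare_signatures (actual : List String) (expected : List String) (out : Bool × String) : Prop := out = compare_signatures_alt actual expected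
instance (actual : List String) (expected : List String) (out : Bool × String) : Decidable (Spec_compare_signatures actual expected out) := by unfold Spec_compare_signatures; infer_instance

-- ===== CLAIM (what is proved, stated in full; the proofs are below) =====
def Claim_equal_compare_signatures : Prop := ∀ (actual : List String) (expected : List String), Dom_compare_signatures actual expected → Spec_compare_signatures actual expected (compare_signatures actual expected)

-- ===== LEMMAS AND PROOFS =====

-- proof-only bridge: the plain (unbounded) list of mismatch lines over two tails
def pvDiffZ : List String → List String → Int → List String
  | a :: as, e :: es, i =>
    if a = e then pvDiffZ as es (i + 1)
    else ("  word " ++ PySem.Int.toStr i ++ ": got " ++ a ++ ", expected " ++ e) :: pvDiffZ as es (i + 1)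
  | _, _, _ => []

-- invariant of A's loop: with fewer than 10 lines accumulated so far, it produces exactly
-- "collect everything, then truncate at 10" prefixed by the accumulator
theorem pvLoopA_eq (actual expected : List String) :
    ∀ (idxs : List Int) (acc : List String), acc.length ≤ 9 →
      pvLoopA actual expected idxs acc =
        (let d := acc ++ (idxs.filter
            (fun i => PySem.List.pyGetD actual i "" ≠ PySem.List.pyGetD expected i "")).map
            (pvLine actual expected)
         if 10 ≤ d.length then d.take 10 ++ ["  ... and more"] else d) := by
  intro idxs
  induction idxs with
  | nil =>
    intro acc hacc
    simp only [pvLoopA, List.filter_nil, List.map_nil, List.append_nil]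
    rw [if_neg (by omega)]
  | cons i rest ih =>
    intro acc hacc
    by_cases h : PySem.List.pyGetD actual i "" ≠ PySem.List.pyGetD expected i ""
    · rw [List.filter_cons_of_pos (by simpa using h), List.map_cons]
      simp only [pvLoopA]
      rw [if_pos h]
      by_cases h9 : acc.length = 9
      · rw [if_pos (by simp [List.length_append]; omega),
          if_pos (by simp [List.length_append, List.length_cons]; omega)]
        rw [show acc ++ pvLine actual expected i ::
              List.map (pvLine actual expected) (List.filter
                (fun i => decide (PySem.List.pyGetD actual i "" ≠ PySem.List.pyGetD expected i "")) rest)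
            = (acc ++ [pvLine actual expected i]) ++
              List.map (pvLine actual expected) (List.filter
                (fun i => decide (PySem.List.pyGetD actual i "" ≠ PySem.List.pyGetD expected i "")) rest)
          from by simp]
        rw [List.take_append]
        rw [List.take_of_length_le (by simp [List.length_append]; omega)]
        simp [List.length_append, h9]
      · rw [if_neg (by simp [List.length_append]; omega)]
        rw [ih _ (by simp [List.length_append]; omega)]
        simp
    · simp only [not_not] at h
      rw [List.filter_cons_of_neg (by simp [h])]
      simp only [pvLoopA]
      rw [if_neg (by simp [h])]
      rw [ih _ hacc]

-- B's budgeted recursion = "collect everything, then truncate at the budget"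
theorem pvDiffLines_eq :
    ∀ (ta te : List String) (i : Int) (k : Nat), ta.length = te.length → 1 ≤ k →
      pvDiffLines ta te i k =
        (let d := pvDiffZ ta te i
         if k ≤ d.length then d.take k ++ ["  ... and more"] else d) := by
  intro ta
  induction ta with
  | nil =>
    intro te i k hl hk
    cases te with
    | nil => simp only [pvDiffLines, pvDiffZ, List.length_nil]; rw [if_neg (by omega)]
    | cons e es => simp at hl
  | cons a as ih =>
    intro te i k hl hk
    cases te with
    | nil => simp at hl
    | cons e es =>
      simp only [List.length_cons] at hl
      by_cases h : a = e
      · simp only [pvDiffLines, pvDiffZ, if_pos h]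
        exact ih es (i + 1) k (by omega) hk
      · simp only [pvDiffLines, pvDiffZ, if_neg h]
        by_cases hk1 : k = 1
        · subst hk1
          rw [if_pos (by simp)]
          simp
        · rw [if_neg hk1]
          rw [ih es (i + 1) (k - 1) (by omega) (by omega)]
          simp only [List.length_cons]
          by_cases hlen : k ≤ (pvDiffZ as es (i + 1)).length + 1
          · rw [if_pos (by omega), if_pos (by omega)]
            rw [List.take_cons (by omega)]
            simp
          · rw [if_neg (by omega), if_neg (by omega)]

-- A's filter-map over range(s, 96) = pvDiffZ over the dropped tails
theorem pvDiffZ_eq_filterMap (actual expected : List String)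
    (ha : actual.length = 96) (he : expected.length = 96) :
    ∀ (n s : Nat), s + n = 96 →
      ((PySem.List.pyRange (s : Int) 96 1).filter
          (fun i => PySem.List.pyGetD actual i "" ≠ PySem.List.pyGetD expected i "")).map
        (pvLine actual expected) = pvDiffZ (actual.drop s) (expected.drop s) s := by
  intro n
  induction n with
  | zero =>
    intro s hs
    have hs96 : s = 96 := by omega
    subst hs96
    rw [PySem.List.pyRange_one_eq_nil (by norm_num)]
    rw [List.drop_eq_nil_of_le (by omega), List.drop_eq_nil_of_le (by omega)]
    simp [pvDiffZ]
  | succ m ih =>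
    intro s hs
    have hslt : s < 96 := by omega
    rw [PySem.List.pyRange_one_cons (by exact_mod_cast hslt)]
    have hda : actual.drop s = actual[s] :: actual.drop (s + 1) :=
      List.drop_eq_getElem_cons (by omega)
    have hde : expected.drop s = expected[s] :: expected.drop (s + 1) :=
      List.drop_eq_getElem_cons (by omega)
    have hga : PySem.List.pyGetD actual (s : Int) "" = actual[s] := by
      rw [PySem.List.pyGetD_natCast]; exact List.getD_eq_getElem _ _ (by omega)
    have hge : PySem.List.pyGetD expected (s : Int) "" = expected[s] := by
      rw [PySem.List.pyGetD_natCast]; exact List.getD_eq_getElem _ _ (by omega)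
    have hcast : (s : Int) + 1 = ((s + 1 : Nat) : Int) := by push_cast; ring
    by_cases h : actual[s] = expected[s]
    · rw [List.filter_cons_of_neg (by simp [hga, hge, h])]
      rw [hcast, ih (s + 1) (by omega)]
      rw [hda, hde]
      simp only [pvDiffZ, if_pos h, hcast]
    · rw [List.filter_cons_of_pos (by simp [hga, hge, h])]
      rw [List.map_cons, hcast, ih (s + 1) (by omega)]
      rw [hda, hde]
      simp only [pvDiffZ, if_neg h, hcast]
      congr 1
      simp [pvLine, hga, hge]

theorem pvDiffZ_self : ∀ (ta : List String) (i : Int), pvDiffZ ta ta i = [] := by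
  intro ta
  induction ta with
  | nil => intro i; simp [pvDiffZ]
  | cons a as ih => intro i; simp [pvDiffZ, ih]

theorem pvDiffZ_ne_nil :
    ∀ (ta te : List String) (i : Int), ta.length = te.length → ta ≠ te →
      pvDiffZ ta te i ≠ [] := by
  intro ta
  induction ta with
  | nil =>
    intro te i hl hne
    cases te with
    | nil => exact absurd rfl hne
    | cons e es => simp at hl
  | cons a as ih =>
    intro te i hl hne
    cases te with
    | nil => simp at hl
    | cons e es =>
      simp only [List.length_cons] at hl
      by_cases h : a = e
      · subst h
        simp only [pvDiffZ]
        exact ih es (i + 1) (by omega) (by intro hh; exact hne (by rw [hh]))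
      · simp [pvDiffZ, if_neg h]

-- ===== VERDICT (by name: the statement is the Claim_ definition above) =====
theorem compare_signatures_spec : Claim_equal_compare_signatures := by
  intro actual expected _
  unfold Spec_compare_signatures compare_signatures compare_signatures_alt
  by_cases h1 : actual.length ≠ 96
  · simp [h1]
  · by_cases h2 : expected.length ≠ 96
    · simp [h1, h2]
    · simp only [not_not] at h1 h2
      simp only [h1, h2, if_neg, not_false_iff, ne_eq, not_true_eq_false]
      rw [pvLoopA_eq actual expected _ [] (by simp), List.nil_append]
      rw [show (32 : Int) = ((32 : Nat) : Int) from by norm_num]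
      rw [pvDiffZ_eq_filterMap actual expected h1 h2 64 32 (by omega)]
      rw [PySem.List.slice_from_natCast, PySem.List.slice_from_natCast]
      by_cases heq : actual.drop 32 = expected.drop 32
      · rw [if_pos heq, heq, pvDiffZ_self]
        simp
      · rw [if_neg heq]
        have hne := pvDiffZ_ne_nil (actual.drop 32) (expected.drop 32) ((32 : Nat) : Int)
          (by simp [h1, h2]) heq
        rw [pvDiffLines_eq _ _ ((32 : Nat) : Int) 10 (by simp [h1, h2]) (by omega)]
        by_cases hlen : 10 ≤ (pvDiffZ (actual.drop 32) (expected.drop 32) ((32 : Nat) : Int)).length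
        · simp only [if_pos hlen]
          simp
        · simp only [if_neg hlen]
          simp [List.isEmpty_iff]
          exact_mod_cast hne
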